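-- pv_equiv track=rewrite | github.com/laleye/LLM_from_Scratch | mini-gpt-workshop/src/tokenization/bpe_tokenizer.py | _merge_pair_in_words
-- ===== SOURCE A (Python) =====
-- from typing import List, Dict, Tuple, Set, Optional, Union
--
-- def _merge_pair_in_words(
--
--     pair: Tuple[str, str],
--     split_words: Dict[str, int]
-- ) -> Dict[str, int]:
--     """
--     Apply a merge operation to all words in the vocabulary.
--
--     Args:
--         pair: The pair of tokens to merge
--         split_words: Dictionary of space-separated token sequences
--
--     Returns:
--         Updated dictionary with the pair merged in all words
--     """
--     new_split_words = {}
--     merged_token = ''.join(pair)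
--
--     for word, freq in split_words.items():
--         tokens = word.split()
--
--         # Apply the merge operation
--         i = 0
--         new_tokens = []
--         while i < len(tokens):
--             # Check if current position matches the pair to merge
--             if (i < len(tokens) - 1 and
--                 tokens[i] == pair[0] and
--                 tokens[i + 1] == pair[1]):
--                 # Merge the pair
--                 new_tokens.append(merged_token)
--                 i += 2
--             else:
--                 # Keep the token as is
--                 new_tokens.append(tokens[i])
--                 i += 1
--
--         # Store the updated word
--         new_word = ' '.join(new_tokens)
--         new_split_words[new_word] = freq
--
--     return new_split_words
-- ===== SOURCE B (Python) =====
-- def _merge_pair_in_words(pair, split_words):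
--     """Single left-to-right pass per word with a one-token carry (state machine),
--     instead of index arithmetic with lookahead."""
--     first, second = pair
--     merged_token = first + second
--     new_split_words = {}
--     for word, freq in split_words.items():
--         out = []
--         carry = None
--         for tok in word.split():
--             if carry is None:
--                 carry = tok
--             elif carry == first and tok == second:
--                 out.append(merged_token)
--                 carry = None
--             else:
--                 out.append(carry)
--                 carry = tok
--         if carry is not None:
--             out.append(carry)
--         new_split_words[' '.join(out)] = freq
--     return new_split_words
-- ===== Notes on version B (the rewrite author's own statement) =====
-- stated objective: alternative
-- what changed: Replaces A's index-based while-loop with one-position lookahead (tokens[i], tokens[i+1], i += 2/1) by a carry-based state-machine fold: one pass over the tokens keeping a single pending token, merging when the pending token and the current token form the pair.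
import Mathlib
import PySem

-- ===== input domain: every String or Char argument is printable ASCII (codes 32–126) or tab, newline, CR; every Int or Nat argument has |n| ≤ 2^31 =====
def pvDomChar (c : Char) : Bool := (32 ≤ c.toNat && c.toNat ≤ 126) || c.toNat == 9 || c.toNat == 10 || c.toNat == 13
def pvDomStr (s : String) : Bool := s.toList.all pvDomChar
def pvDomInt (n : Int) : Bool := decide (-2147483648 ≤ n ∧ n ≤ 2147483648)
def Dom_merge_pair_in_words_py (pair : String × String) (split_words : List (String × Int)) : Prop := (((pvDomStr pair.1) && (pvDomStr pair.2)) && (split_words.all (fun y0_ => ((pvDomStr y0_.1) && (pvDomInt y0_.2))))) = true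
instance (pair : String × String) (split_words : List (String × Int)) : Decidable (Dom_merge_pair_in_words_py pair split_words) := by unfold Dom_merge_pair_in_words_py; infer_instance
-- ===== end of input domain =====

-- B replaces A's index-based lookahead while-loop by a one-pass carry state machine; equivalence of the RETURN value is proved (same cost, 'alternative').

-- ===== PORT A =====
-- the 'while i < len(tokens)' loop of A: index i, accumulator new_tokens
def mergeLoopA (p1 p2 m : String) (tokens : List String) (i : Nat) (acc : List String) : List String :=
  if i < tokens.length then
    if i < tokens.length - 1 ∧ tokens.getD i "" = p1 ∧ tokens.getD (i + 1) "" = p2 then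
      mergeLoopA p1 p2 m tokens (i + 2) (acc ++ [m])
    else
      mergeLoopA p1 p2 m tokens (i + 1) (acc ++ [tokens.getD i ""])
  else acc
termination_by tokens.length - i

def merge_pair_in_words_py (pair : String × String) (split_words : List (String × Int)) : List (String × Int) :=
  ((PySem.Dict.ofList split_words).items.foldl
    (fun nd wf =>
      nd.insert
        (PySem.Str.join " "
          (mergeLoopA pair.1 pair.2 (PySem.Str.join "" [pair.1, pair.2]) (PySem.Str.split₀ wf.1) 0 []))
        wf.2)
    PySem.Dict.empty).items

-- ===== PORT B =====
-- one step of B's state machine: state = (emitted tokens, pending carry token)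
def mergeStepB (p1 p2 m : String) (st : List String × Option String) (tok : String) : List String × Option String :=
  match st.2 with
  | none => (st.1, some tok)
  | some c => if c = p1 ∧ tok = p2 then (st.1 ++ [m], none) else (st.1 ++ [c], some tok)

def mergeFlushB (st : List String × Option String) : List String :=
  match st.2 with
  | none => st.1
  | some c => st.1 ++ [c]

def merge_pair_in_words_py_alt (pair : String × String) (split_words : List (String × Int)) : List (String × Int) :=
  ((PySem.Dict.ofList split_words).items.foldl
    (fun nd wf =>
      nd.insert
        (PySem.Str.join " "
          (mergeFlushB ((PySem.Str.split₀ wf.1).foldl (mergeStepB pair.1 pair.2 (pair.1 ++ pair.2)) ([], none))))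
        wf.2)
    PySem.Dict.empty).items

-- ===== PRECONDITION & SPEC =====
def Spec_merge_pair_in_words_py (pair : String × String) (split_words : List (String × Int)) (out : List (String × Int)) : Prop := out = merge_pair_in_words_py_alt pair split_words
instance (pair : String × String) (split_words : List (String × Int)) (out : List (String × Int)) : Decidable (Spec_merge_pair_in_words_py pair split_words out) := by unfold Spec_merge_pair_in_words_py; infer_instance

-- ===== CLAIM (what is proved, stated in full; the proofs are below) =====
def Claim_equal_merge_pair_in_words_py : Prop := ∀ (pair : String × String) (split_words : List (String × Int)), Dom_merge_pair_in_words_py pair split_words → Spec_merge_pair_in_words_py pair split_words (merge_pair_in_words_py pair split_words)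

-- ===== LEMMAS AND PROOFS =====

-- reference shape both loops compute: greedy left-to-right merge, structural on the token list
def mergeRec (p1 p2 m : String) : List String → List String
  | [] => []
  | [t] => [t]
  | t1 :: t2 :: rest =>
      if t1 = p1 ∧ t2 = p2 then m :: mergeRec p1 p2 m rest
      else t1 :: mergeRec p1 p2 m (t2 :: rest)

lemma mergeLoopA_eq (p1 p2 m : String) (tokens : List String) :
    ∀ (n i : Nat), tokens.length - i ≤ n → ∀ acc,
      mergeLoopA p1 p2 m tokens i acc = acc ++ mergeRec p1 p2 m (tokens.drop i) := by
  intro n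
  induction n with
  | zero =>
      intro i hi acc
      have hlen : tokens.length ≤ i := by omega
      rw [mergeLoopA, if_neg (by omega), List.drop_of_length_le hlen, mergeRec]
      simp
  | succ n ih =>
      intro i hi acc
      by_cases h : i < tokens.length
      · have hdrop : tokens.drop i = tokens[i] :: tokens.drop (i + 1) :=
          List.drop_eq_getElem_cons h
        have hgd : tokens.getD i "" = tokens[i] := List.getD_eq_getElem tokens "" h
        by_cases hc : i < tokens.length - 1 ∧ tokens.getD i "" = p1 ∧ tokens.getD (i + 1) "" = p2
        · have h1 : i + 1 < tokens.length := by omega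
          have hdrop1 : tokens.drop (i + 1) = tokens[i + 1] :: tokens.drop (i + 2) :=
            List.drop_eq_getElem_cons h1
          have hgd1 : tokens.getD (i + 1) "" = tokens[i + 1] := List.getD_eq_getElem tokens "" h1
          rw [mergeLoopA, if_pos h, if_pos hc, ih (i + 2) (by omega)]
          rw [hdrop, hdrop1, mergeRec]
          rw [if_pos ⟨by rw [← hgd]; exact hc.2.1, by rw [← hgd1]; exact hc.2.2⟩]
          simp only [List.append_assoc, List.singleton_append]
        · rw [mergeLoopA, if_pos h, if_neg hc, ih (i + 1) (by omega)]
          rw [hdrop, hgd]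
          rcases hd1 : tokens.drop (i + 1) with _ | ⟨t2, rest⟩
          · have hlen1 : tokens.length ≤ i + 1 := by
              rcases Nat.lt_or_ge (i + 1) tokens.length with hlt | hge
              · rw [List.drop_eq_getElem_cons hlt] at hd1
                exact (List.cons_ne_nil _ _ hd1).elim
              · exact hge
            rw [mergeRec, mergeRec]
            simp
          · have h1 : i + 1 < tokens.length := by
              by_contra hcon
              rw [List.drop_of_length_le (by omega)] at hd1
              exact absurd hd1 (by simp)
            have ht2 : t2 = tokens[i + 1] := by
              have := List.drop_eq_getElem_cons h1
              rw [hd1] at this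
              exact (List.cons.injEq _ _ _ _ ▸ this).1
            have hgd1 : tokens.getD (i + 1) "" = t2 := by
              rw [List.getD_eq_getElem tokens "" h1, ht2]
            rw [mergeRec, if_neg]
            · simp
            · intro ⟨ha, hb⟩
              exact hc ⟨by omega, by rw [hgd]; exact ha, by rw [hgd1]; exact hb⟩
      · rw [mergeLoopA, if_neg h, List.drop_of_length_le (by omega), mergeRec]
        simp

lemma mergeFoldB_eq (p1 p2 m : String) :
    ∀ l : List String,
      (∀ acc c, mergeFlushB (l.foldl (mergeStepB p1 p2 m) (acc, some c)) = acc ++ mergeRec p1 p2 m (c :: l)) ∧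
      (∀ acc, mergeFlushB (l.foldl (mergeStepB p1 p2 m) (acc, none)) = acc ++ mergeRec p1 p2 m l) := by
  intro l
  induction l with
  | nil =>
      constructor
      · intro acc c; simp [mergeFlushB, mergeRec]
      · intro acc; simp [mergeFlushB, mergeRec]
  | cons t rest ih =>
      constructor
      · intro acc c
        by_cases hc : c = p1 ∧ t = p2
        · rw [List.foldl_cons, show mergeStepB p1 p2 m (acc, some c) t = (acc ++ [m], none) from by
            simp [mergeStepB, if_pos hc]]
          rw [ih.2, mergeRec, if_pos hc]
          simp
        · rw [List.foldl_cons, show mergeStepB p1 p2 m (acc, some c) t = (acc ++ [c], some t) from by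
            simp [mergeStepB, if_neg hc]]
          rw [ih.1, mergeRec, if_neg hc]
          simp
      · intro acc
        rw [List.foldl_cons, show mergeStepB p1 p2 m (acc, none) t = (acc, some t) from rfl]
        exact ih.1 acc t

lemma join_pair_eq (a b : String) : PySem.Str.join "" [a, b] = a ++ b := by
  apply String.ext
  simp [PySem.Str.toList_join, PySem.Chars.join_cons_cons, PySem.Chars.join_singleton]

lemma per_word_eq (p1 p2 : String) (toks : List String) :
    mergeLoopA p1 p2 (PySem.Str.join "" [p1, p2]) toks 0 [] =
      mergeFlushB (toks.foldl (mergeStepB p1 p2 (p1 ++ p2)) ([], none)) := by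
  rw [join_pair_eq, mergeLoopA_eq p1 p2 (p1 ++ p2) toks toks.length 0 (by omega) [],
    (mergeFoldB_eq p1 p2 (p1 ++ p2) toks).2]
  simp

-- ===== VERDICT (by name: the statement is the Claim_ definition above) =====
theorem merge_pair_in_words_py_spec : Claim_equal_merge_pair_in_words_py := by
  intro pair split_words _
  unfold Spec_merge_pair_in_words_py merge_pair_in_words_py merge_pair_in_words_py_alt
  have hf : (fun (nd : PySem.Dict String Int) (wf : String × Int) =>
        nd.insert (PySem.Str.join " "
          (mergeLoopA pair.1 pair.2 (PySem.Str.join "" [pair.1, pair.2]) (PySem.Str.split₀ wf.1) 0 [])) wf.2)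
      = (fun (nd : PySem.Dict String Int) (wf : String × Int) =>
        nd.insert (PySem.Str.join " "
          (mergeFlushB ((PySem.Str.split₀ wf.1).foldl (mergeStepB pair.1 pair.2 (pair.1 ++ pair.2)) ([], none)))) wf.2) := by
    funext nd wf
    rw [per_word_eq]
  rw [hf]
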